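-- pv_equiv track=rewrite | github.com/jeqcho/single-winner-generative-social-choice | src/experiment_utils/analyze_ranking_stability.py | compute_exact_matches
-- ===== SOURCE A (Python) =====
-- from typing import Dict, List, Tuple
-- from itertools import combinations
--
-- def compute_exact_matches(rankings: List[List[int]]) -> Tuple[int, int]:
--     """
--     Count exact matches among pairs of rankings.
--
--     Returns (n_matches, n_pairs).
--     """
--     n_rankings = len(rankings)
--     if n_rankings < 2:
--         return 0, 0
--
--     n_matches = 0
--     n_pairs = 0
--
--     for i, j in combinations(range(n_rankings), 2):
--         n_pairs += 1
--         if rankings[i] == rankings[j]: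
--             n_matches += 1
--
--     return n_matches, n_pairs
-- ===== SOURCE B (Python) =====
-- def compute_exact_matches(rankings):
--     """
--     Count exact matches among pairs of rankings.
--
--     Returns (n_matches, n_pairs).
--     """
--     n = len(rankings)
--     counts = {}
--     n_matches = 0
--     for r in rankings:
--         key = tuple(r)
--         c = counts.get(key, 0)
--         n_matches += c
--         counts[key] = c + 1
--     return n_matches, n * (n - 1) // 2
-- ===== Notes on version B (the rewrite author's own statement) =====
-- stated objective: alternative
-- what changed: Replaced the quadratic scan over all index pairs with a single pass that hashes each ranking in a counter (adding the number of previously seen equal rankings) and computes n_pairs by the closed form n*(n-1)//2.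
import Mathlib
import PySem

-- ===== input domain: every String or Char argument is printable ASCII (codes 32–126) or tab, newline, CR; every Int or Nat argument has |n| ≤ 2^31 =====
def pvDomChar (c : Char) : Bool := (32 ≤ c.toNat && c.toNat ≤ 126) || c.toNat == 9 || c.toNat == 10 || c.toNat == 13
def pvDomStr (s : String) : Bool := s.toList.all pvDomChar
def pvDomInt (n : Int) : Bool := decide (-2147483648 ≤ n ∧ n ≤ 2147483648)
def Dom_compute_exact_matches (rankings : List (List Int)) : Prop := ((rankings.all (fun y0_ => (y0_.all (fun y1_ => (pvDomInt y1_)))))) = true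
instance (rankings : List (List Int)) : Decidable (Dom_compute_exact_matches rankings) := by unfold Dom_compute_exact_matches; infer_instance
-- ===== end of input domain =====

-- B replaces A's scan over all index pairs by one counter pass plus the closed form n*(n-1)//2 (alternative algorithm; not measurably faster on the timed inputs).

-- ===== PORT A =====
-- itertools.combinations(l, 2), in Python's order
def pvComb2 {α : Type} : List α → List (α × α)
  | [] => []
  | x :: xs => xs.map (fun y => (x, y)) ++ pvComb2 xs

def compute_exact_matches (rankings : List (List Int)) : Int × Int :=
  let n_rankings : Int := (rankings.length : Int)
  if n_rankings < 2 then (0, 0)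
  else
    (pvComb2 (PySem.List.pyRange 0 n_rankings 1)).foldl
      (fun (st : Int × Int) ij =>
        let n_pairs := st.2 + 1
        if PySem.List.pyGetD rankings ij.1 [] = PySem.List.pyGetD rankings ij.2 [] then
          (st.1 + 1, n_pairs)
        else (st.1, n_pairs))
      (0, 0)

-- ===== PORT B =====
def compute_exact_matches_alt (rankings : List (List Int)) : Int × Int :=
  let n : Int := (rankings.length : Int)
  let st := rankings.foldl
    (fun (st : PySem.Dict (List Int) Int × Int) r =>
      let c := st.1.getD r 0
      (st.1.insert r (c + 1), st.2 + c))
    (PySem.Dict.empty, 0)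
  (st.2, PySem.Int.floordiv (n * (n - 1)) 2)

-- ===== PRECONDITION & SPEC =====
def Spec_compute_exact_matches (rankings : List (List Int)) (out : Int × Int) : Prop := out = compute_exact_matches_alt rankings
instance (rankings : List (List Int)) (out : Int × Int) : Decidable (Spec_compute_exact_matches rankings out) := by unfold Spec_compute_exact_matches; infer_instance

-- ===== CLAIM (what is proved, stated in full; the proofs are below) =====
def Claim_equal_compute_exact_matches : Prop := ∀ (rankings : List (List Int)), Dom_compute_exact_matches rankings → Spec_compute_exact_matches rankings (compute_exact_matches rankings)

-- ===== LEMMAS AND PROOFS =====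

-- pvN p xs: number of equal pairs formed by one element of xs and one element of p ++ (the part of
-- xs before it), i.e. B's running match count when the dict already holds the prefix p
def pvN (p : List (List Int)) : List (List Int) → Int
  | [] => 0
  | x :: xs => (p.count x : Int) + pvN (p ++ [x]) xs

lemma pv_countP_eq_count (x : List Int) (xs : List (List Int)) :
    List.countP (fun y => decide (x = y)) xs = xs.count x := by
  rw [List.count_eq_countP]
  apply List.countP_congr
  intro y _
  by_cases h : x = y
  · simp [h]
  · simp [h, beq_iff_eq]
    exact fun e => h e.symm

lemma pv_sum_count_singleton (x : List Int) (xs : List (List Int)) :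
    ((xs.map fun y => (([x].count y : Nat) : Int)).sum) = (xs.count x : Int) := by
  have h : (xs.map fun y => (([x].count y : Nat) : Int))
      = (xs.map fun y => if (fun y => decide (x = y)) y = true then (1:Int) else 0) := by
    apply List.map_congr_left
    intro y _
    simp only [List.count_cons, List.count_nil, beq_iff_eq, decide_eq_true_eq]
    by_cases h : x = y <;> simp [h]
  rw [h, PySem.List.sum_map_ite_one_zero, pv_countP_eq_count]

lemma pvN_shift (xs : List (List Int)) : ∀ p : List (List Int),
    pvN p xs = (xs.map (fun x => (p.count x : Int))).sum + pvN [] xs := by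
  induction xs with
  | nil => intro p; simp [pvN]
  | cons x xs ih =>
    intro p
    simp only [pvN, List.map_cons, List.sum_cons, List.count_nil, List.nil_append]
    rw [ih (p ++ [x]), ih [x]]
    simp only [List.count_append]
    push_cast
    rw [PySem.List.sum_map_add_int xs (fun y => ((p.count y : Nat) : Int)) (fun y => (([x].count y : Nat) : Int))]
    ring

lemma pvN_cons (x : List Int) (xs : List (List Int)) :
    pvN [] (x :: xs) = (xs.count x : Int) + pvN [] xs := by
  simp only [pvN, List.count_nil, List.nil_append, Nat.cast_zero, zero_add]
  rw [pvN_shift xs [x], pv_sum_count_singleton]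

-- B's fold, started from any dict that acts as the counter of a prefix p
lemma pvB_fold (xs : List (List Int)) : ∀ (d : PySem.Dict (List Int) Int) (p : List (List Int)) (acc : Int),
    (∀ r, d.getD r 0 = (p.count r : Int)) →
    (xs.foldl (fun (st : PySem.Dict (List Int) Int × Int) r =>
        let c := st.1.getD r 0
        (st.1.insert r (c + 1), st.2 + c)) (d, acc)).2 = acc + pvN p xs := by
  induction xs with
  | nil => intro d p acc h; simp [pvN]
  | cons x xs ih =>
    intro d p acc h
    simp only [List.foldl_cons, pvN]
    rw [ih (d.insert x (d.getD x 0 + 1)) (p ++ [x]) (acc + d.getD x 0) ?_]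
    · rw [h x]; ring
    · intro r
      rw [PySem.Dict.getD_insert]
      by_cases hr : r = x
      · subst hr; rw [h]; simp [List.count_append]
      · have hz : List.count r [x] = 0 := List.count_eq_zero.mpr (by simp [hr])
        simp [if_neg hr, h r, List.count_append, hz]

-- A's fold: counts the matching pairs and the total number of pairs
lemma pvA_fold (pred : Int × Int → Prop) [DecidablePred pred] :
    ∀ (l : List (Int × Int)) (a b : Int),
    l.foldl (fun (st : Int × Int) ij =>
        let n_pairs := st.2 + 1
        if pred ij then (st.1 + 1, n_pairs) else (st.1, n_pairs)) (a, b)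
      = (a + (l.countP (fun ij => decide (pred ij)) : Int), b + (l.length : Int)) := by
  intro l
  induction l with
  | nil => intro a b; simp
  | cons ij l ih =>
    intro a b
    simp only [List.foldl_cons, List.countP_cons, List.length_cons]
    by_cases h : pred ij
    · simp only [ih, h, decide_true]
      push_cast
      simp only [Prod.mk.injEq]
      constructor <;> ring
    · simp only [ih, h, decide_false]
      push_cast
      simp only [Prod.mk.injEq]
      constructor <;> ring

lemma pvComb2_map {α β : Type} (f : α → β) : ∀ (l : List α),
    pvComb2 (l.map f) = (pvComb2 l).map (fun ab => (f ab.1, f ab.2)) := by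
  intro l
  induction l with
  | nil => rfl
  | cons x xs ih => simp [pvComb2, ih, List.map_map, Function.comp]

lemma pvComb2_countP_eq (xs : List (List Int)) :
    ((pvComb2 xs).countP (fun ab => decide (ab.1 = ab.2)) : Int) = pvN [] xs := by
  induction xs with
  | nil => simp [pvComb2, pvN]
  | cons x xs ih =>
    rw [pvN_cons]
    simp only [pvComb2, List.countP_append, List.countP_map]
    rw [← ih]
    push_cast
    congr 1
    exact_mod_cast pv_countP_eq_count x xs

lemma pvComb2_length {α : Type} : ∀ (xs : List α),
    2 * (pvComb2 xs).length + xs.length = xs.length * xs.length := by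
  intro xs
  induction xs with
  | nil => rfl
  | cons x xs ih =>
    simp only [pvComb2, List.length_append, List.length_map, List.length_cons]
    nlinarith [ih]

-- ===== VERDICT (by name: the statement is the Claim_ definition above) =====
theorem compute_exact_matches_spec : Claim_equal_compute_exact_matches := by
  intro rankings _
  unfold Spec_compute_exact_matches compute_exact_matches compute_exact_matches_alt
  by_cases h : (rankings.length : Int) < 2
  · rw [if_pos h]
    match rankings, h with
    | [], _ => rfl
    | [a], _ =>
      simp only [List.foldl_cons, List.foldl_nil, PySem.Dict.getD_empty]
      norm_num [PySem.Int.floordiv_eq_ediv_of_pos (by norm_num : (0:Int) < 2)]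
    | a :: b :: t, h => simp at h; omega
  · rw [if_neg h]
    rw [pvA_fold]
    have hlen : (PySem.List.pyRange 0 (rankings.length : Int) 1).length = rankings.length := by
      rw [PySem.List.length_pyRange_one]; omega
    have hmap : (PySem.List.pyRange 0 (rankings.length : Int) 1).map (fun j => PySem.List.pyGetD rankings j []) = rankings :=
      PySem.List.map_pyGetD_pyRange_zero' rankings []
    have hcount : ((pvComb2 (PySem.List.pyRange 0 (rankings.length : Int) 1)).countP
        (fun ij => decide (PySem.List.pyGetD rankings ij.1 [] = PySem.List.pyGetD rankings ij.2 [])) : Int)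
        = pvN [] rankings := by
      have hstep : List.countP (fun ij : Int × Int => decide (PySem.List.pyGetD rankings ij.1 [] = PySem.List.pyGetD rankings ij.2 []))
          (pvComb2 (PySem.List.pyRange 0 (rankings.length : Int) 1))
          = List.countP (fun ab : List Int × List Int => decide (ab.1 = ab.2)) (pvComb2 rankings) := by
        conv_rhs => rw [← hmap, pvComb2_map, List.countP_map]
        rfl
      rw [hstep]
      exact pvComb2_countP_eq rankings
    have hB := pvB_fold rankings PySem.Dict.empty [] 0 (by intro r; simp)
    have hpairs : ((pvComb2 (PySem.List.pyRange 0 (rankings.length : Int) 1)).length : Int)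
        = PySem.Int.floordiv ((rankings.length : Int) * ((rankings.length : Int) - 1)) 2 := by
      have h2 := pvComb2_length (PySem.List.pyRange 0 (rankings.length : Int) 1)
      rw [hlen] at h2
      have : ((rankings.length : Int)) * ((rankings.length : Int) - 1)
          = 2 * ((pvComb2 (PySem.List.pyRange 0 (rankings.length : Int) 1)).length : Int) := by
        have h2' : (2:Int) * ((pvComb2 (PySem.List.pyRange 0 (rankings.length : Int) 1)).length : Int) + (rankings.length : Int) = (rankings.length : Int) * (rankings.length : Int) := by exact_mod_cast h2
        linear_combination -h2'
      rw [this, PySem.Int.floordiv_eq_ediv_of_pos (by norm_num : (0:Int) < 2),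
        Int.mul_ediv_cancel_left _ (by norm_num : (2:Int) ≠ 0)]
    refine Prod.ext ?_ ?_
    · simpa [hcount] using hB.symm
    · simpa using hpairs
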